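-- pv_equiv track=rewrite | github.com/SubtlePants/AdventOfCode2024 | src/Day1/day1.py | _two_list_similarity
-- ===== SOURCE A (Python) =====
-- from functools import reduce
--
-- def _two_list_similarity(list1: list[int], list2: list[int]) -> int:
--     list2occurences: dict[int, int] = {}
--     for number in list2:
--         try:
--              list2occurences[number] = list2occurences[number] + 1
--         except:
--             list2occurences[number] = 1
--     return reduce(lambda x,y: x + (y * _list_two_occurance(list2occurences, y)), list1, 0)
--
-- def _list_two_occurance(occurances: dict[int, int], number: int):
--     try:
--         return occurances[number]
--     except:
--         return 0
-- ===== SOURCE B (Python) =====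
-- def _two_list_similarity(list1: list[int], list2: list[int]) -> int:
--     c1: dict[int, int] = {}
--     for x in list1:
--         c1[x] = c1.get(x, 0) + 1
--     c2: dict[int, int] = {}
--     for x in list2:
--         c2[x] = c2.get(x, 0) + 1
--     return sum(k * m * c2.get(k, 0) for k, m in c1.items())
-- ===== Notes on version B (the rewrite author's own statement) =====
-- stated objective: alternative
-- what changed: B builds frequency maps of BOTH lists and sums k * c1[k] * c2[k] over the distinct keys of list1, instead of A's reduce over every element of list1 with a per-element lookup into list2's counts.
import Mathlib
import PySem

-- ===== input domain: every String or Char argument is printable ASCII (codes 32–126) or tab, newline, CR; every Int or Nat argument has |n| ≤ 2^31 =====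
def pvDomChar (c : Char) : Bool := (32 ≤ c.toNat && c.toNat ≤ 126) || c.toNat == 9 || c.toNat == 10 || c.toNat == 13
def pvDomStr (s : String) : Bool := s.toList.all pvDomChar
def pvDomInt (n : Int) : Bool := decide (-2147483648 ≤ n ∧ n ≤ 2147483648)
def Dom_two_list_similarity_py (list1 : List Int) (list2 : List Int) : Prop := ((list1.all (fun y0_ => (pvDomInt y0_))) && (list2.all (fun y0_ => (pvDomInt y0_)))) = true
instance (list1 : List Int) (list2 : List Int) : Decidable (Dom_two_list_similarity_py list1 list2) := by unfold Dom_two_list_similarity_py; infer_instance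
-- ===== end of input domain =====

-- B replaces A's per-element reduce over list1 by a sum over the DISTINCT keys of a
-- frequency map of list1, weighted by both multiplicities (alternative decomposition).

-- ===== PORT A =====
-- try: occ[n] = occ[n] + 1 / except: occ[n] = 1  ≡  occ[n] = occ.get(n, 0) + 1
def two_list_similarity_py (list1 : List Int) (list2 : List Int) : Int :=
  let occ : PySem.Dict Int Int :=
    list2.foldl (fun d n => d.insert n (d.getD n 0 + 1)) PySem.Dict.empty
  list1.foldl (fun x y => x + y * occ.getD y 0) 0

-- ===== PORT B =====
def two_list_similarity_py_alt (list1 : List Int) (list2 : List Int) : Int :=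
  let c1 : PySem.Dict Int Int :=
    list1.foldl (fun d x => d.insert x (d.getD x 0 + 1)) PySem.Dict.empty
  let c2 : PySem.Dict Int Int :=
    list2.foldl (fun d x => d.insert x (d.getD x 0 + 1)) PySem.Dict.empty
  (c1.items.map (fun p => p.1 * p.2 * c2.getD p.1 0)).sum

-- ===== PRECONDITION & SPEC =====
def Spec_two_list_similarity_py (list1 : List Int) (list2 : List Int) (out : Int) : Prop := out = two_list_similarity_py_alt list1 list2
instance (list1 : List Int) (list2 : List Int) (out : Int) : Decidable (Spec_two_list_similarity_py list1 list2 out) := by unfold Spec_two_list_similarity_py; infer_instance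

-- ===== CLAIM (what is proved, stated in full; the proofs are below) =====
def Claim_equal_two_list_similarity_py : Prop := ∀ (list1 : List Int) (list2 : List Int), Dom_two_list_similarity_py list1 list2 → Spec_two_list_similarity_py list1 list2 (two_list_similarity_py list1 list2)

-- ===== LEMMAS AND PROOFS =====

-- On a Nodup list containing x, the sum of (if k = x then f k else 0) is f x.
lemma pv_sum_ite_eq (S : List Int) (hnd : S.Nodup) (x : Int) (hx : x ∈ S) (f : Int → Int) :
    (S.map (fun k => if k = x then f k else 0)).sum = f x := by
  induction S with
  | nil => cases hx
  | cons a t ih =>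
    rcases List.nodup_cons.mp hnd with ⟨ha, hndt⟩
    by_cases h : a = x
    · subst h
      have : (t.map (fun k => if k = a then f k else 0)).sum = 0 := by
        apply List.sum_eq_zero
        intro z hz
        rcases List.mem_map.mp hz with ⟨k, hk, rfl⟩
        have : k ≠ a := fun he => ha (he ▸ hk)
        simp [this]
      simp [this]
    · have hx' : x ∈ t := by
        rcases hx with _ | hx'
        · exact absurd rfl h
        · assumption
      simp [h, ih hndt hx']

-- Summing f over xs equals summing (count xs k) * f k over any Nodup superset of xs's elements.
lemma pv_sum_count (f : Int → Int) (xs : List Int) (S : List Int) (hnd : S.Nodup)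
    (hsub : ∀ y ∈ xs, y ∈ S) :
    (S.map (fun k => (xs.count k : Int) * f k)).sum = (xs.map f).sum := by
  induction xs with
  | nil => simp
  | cons x t ih =>
    have hsub' : ∀ y ∈ t, y ∈ S := fun y hy => hsub y (List.mem_cons_of_mem _ hy)
    have hxS : x ∈ S := hsub x (List.mem_cons_self)
    have hsplit : ∀ k : Int, ((x :: t).count k : Int) * f k
        = (t.count k : Int) * f k + (if k = x then f k else 0) := by
      intro k
      by_cases h : k = x
      · subst h; simp [List.count_cons_self]; ring
      · simp only [List.count_cons, h]
        simp
        exact Or.inl fun he => h he.symm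
    calc (S.map (fun k => ((x :: t).count k : Int) * f k)).sum
        = (S.map (fun k => (t.count k : Int) * f k + (if k = x then f k else 0))).sum := by
          congr 1; exact List.map_congr_left (fun k _ => hsplit k)
      _ = (S.map (fun k => (t.count k : Int) * f k)).sum
            + (S.map (fun k => if k = x then f k else 0)).sum := by
          rw [← List.sum_map_add]
      _ = (t.map f).sum + f x := by rw [ih hsub', pv_sum_ite_eq S hnd x hxS f]
      _ = ((x :: t).map f).sum := by simp [add_comm]

-- A's loop is the sum of y * count(list2, y) over list1.
lemma pv_A_eq_sum (list1 list2 : List Int) :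
    two_list_similarity_py list1 list2
      = (list1.map (fun y => y * (list2.count y : Int))).sum := by
  unfold two_list_similarity_py
  have hocc : ∀ y : Int,
      (list2.foldl (fun d n => d.insert n (d.getD n 0 + 1)) PySem.Dict.empty).getD y 0
        = (list2.count y : Int) := by
    intro y
    rw [PySem.Dict.getD_foldl_insert_add_one]
    simp [PySem.Dict.getD_empty]
  simp only [hocc]
  rw [PySem.List.foldl_add list1 (fun y => y * (list2.count y : Int)) 0]
  simp

-- B is the sum of k * count(list1,k) * count(list2,k) over the distinct elements of list1.
lemma pv_B_eq_sum (list1 list2 : List Int) :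
    two_list_similarity_py_alt list1 list2
      = ((PySem.Set.ofList list1).map
          (fun k => (list1.count k : Int) * (k * (list2.count k : Int)))).sum := by
  unfold two_list_similarity_py_alt
  simp only [PySem.Dict.foldl_insert_getD_add_one_eq_counter]
  rw [PySem.Dict.items_counter]
  rw [List.map_map]
  congr 1
  apply List.map_congr_left
  intro k _
  have h2 : (PySem.Dict.counter list2).getD k 0 = (list2.count k : Int) :=
    PySem.Dict.getD_counter list2 k
  simp only [Function.comp, h2]
  ring

-- ===== VERDICT (by name: the statement is the Claim_ definition above) =====
theorem two_list_similarity_py_spec : Claim_equal_two_list_similarity_py := by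
  intro list1 list2 _
  unfold Spec_two_list_similarity_py
  rw [pv_A_eq_sum, pv_B_eq_sum]
  rw [← pv_sum_count (fun y => y * (list2.count y : Int)) list1 (PySem.Set.ofList list1)
      (PySem.Set.nodup_ofList list1) (fun y hy => (PySem.Set.mem_ofList list1 y).mpr hy)]
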